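-- pv_equiv track=rewrite | github.com/AngelicaDiazB14/CLASESP. | Portafolio2A.py | construirImpares_aux
-- ===== SOURCE A (Python) =====
-- def construirImpares_aux(n,potencia,resultado):
--     if(n == 0):
--         return resultado
--     else:
--         digito = (n%10)
--         if((digito % 2) != 0):
--             resultado +=(digito *(10**potencia))
--             return construirImpares_aux(n//10,potencia + 1,resultado)
--         else:
--             return construirImpares_aux(n//10,potencia,resultado)
-- ===== SOURCE B (Python) =====
-- def construirImpares_aux(n, potencia, resultado):
--     # Collect all digits of n (least significant first), keep the odd ones,
--     # then assemble the answer with one positional sum.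
--     digitos = []
--     while n != 0:
--         digitos.append(n % 10)
--         n //= 10
--     impares = [d for d in digitos if d % 2 != 0]
--     return resultado + sum(d * 10 ** (potencia + i) for i, d in enumerate(impares))
-- ===== Notes on version B (the rewrite author's own statement) =====
-- stated objective: alternative
-- what changed: Replaces the tail recursion that threads (potencia, resultado) accumulators through every digit by a three-phase pipeline: extract the digit list with a loop, filter the odd digits, and build the result as one enumerate-indexed sum.
-- outside the precondition, e.g. on construirImpares_aux(-3, 0, 0): A raises RecursionError, B does not finish within the time limit; on construirImpares_aux(20, -1, 5): A returns 5, B returns 5; on construirImpares_aux(13, -1, 0): A returns 1.3, B returns 1.3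
import Mathlib
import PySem

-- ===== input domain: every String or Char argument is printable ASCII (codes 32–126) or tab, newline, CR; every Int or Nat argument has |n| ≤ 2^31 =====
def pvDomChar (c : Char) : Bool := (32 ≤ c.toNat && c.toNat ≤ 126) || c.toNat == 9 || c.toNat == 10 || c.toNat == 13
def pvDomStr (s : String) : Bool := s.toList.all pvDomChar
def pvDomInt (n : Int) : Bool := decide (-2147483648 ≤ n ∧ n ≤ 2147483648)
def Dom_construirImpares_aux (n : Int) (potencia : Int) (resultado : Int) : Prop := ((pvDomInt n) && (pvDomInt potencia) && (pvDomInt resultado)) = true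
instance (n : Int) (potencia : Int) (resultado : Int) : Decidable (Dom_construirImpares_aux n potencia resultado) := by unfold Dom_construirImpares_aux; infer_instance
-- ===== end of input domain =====

-- B rebuilds the number in three phases (digit extraction, odd filter, positional sum) instead of A's accumulator tail recursion; objective: alternative decomposition, same cost.


-- termination helper for both ports' recursion on n // 10
theorem pvDiv10_lt (n : Int) (h : 0 < n) : (PySem.Int.floordiv n 10).toNat < n.toNat := by
  rw [PySem.Int.floordiv_eq_ediv_of_pos (by norm_num)]
  omega

-- ===== PORT A =====
-- literal port of A; the 'n < 0' guard only makes the recursion total (Python's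
-- recursion never terminates for n < 0, which Pre_ excludes)
def construirImpares_aux (n : Int) (potencia : Int) (resultado : Int) : Int :=
  if _h0 : n = 0 then resultado
  else if _hneg : n < 0 then resultado
  else
    let digito := PySem.Int.mod n 10
    if PySem.Int.mod digito 2 ≠ 0 then
      -- 10**potencia ported as 10 ^ potencia.toNat; exact for 0 ≤ potencia (Pre_)
      construirImpares_aux (PySem.Int.floordiv n 10) (potencia + 1) (resultado + digito * 10 ^ potencia.toNat)
    else
      construirImpares_aux (PySem.Int.floordiv n 10) potencia resultado
termination_by n.toNat
decreasing_by all_goals exact pvDiv10_lt n (by omega)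

-- ===== PORT B =====
-- 'while n != 0: digitos.append(n % 10); n //= 10' — the 'n ≤ 0' guard makes the
-- loop total (for n < 0 the Python loop never terminates; excluded by Pre_)
def pvDigitos (n : Int) : List Int :=
  if _h : n ≤ 0 then []
  else PySem.Int.mod n 10 :: pvDigitos (PySem.Int.floordiv n 10)
termination_by n.toNat
decreasing_by exact pvDiv10_lt n (by omega)

def construirImpares_aux_alt (n : Int) (potencia : Int) (resultado : Int) : Int :=
  let digitos := pvDigitos n
  let impares := digitos.filter (fun d => PySem.Int.mod d 2 ≠ 0)
  -- sum(d * 10**(potencia + i) for i, d in enumerate(impares)); exact for 0 ≤ potencia (Pre_)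
  resultado + (PySem.List.enumerate impares 0).foldl (fun acc q => acc + q.2 * 10 ^ (potencia + q.1).toNat) 0

-- ===== PRECONDITION & SPEC =====
-- Pre_ excludes n < 0 (both the recursion of A and B's while-loop never terminate:
-- RecursionError / divergence) and potencia < 0 (10**potencia is a float, so where an odd
-- digit exists A returns a float, not an int; where no odd digit exists A accidentally
-- returns resultado — that corner is excluded with the same bound).
def Pre_construirImpares_aux (n : Int) (potencia : Int) (resultado : Int) : Prop := 0 ≤ n ∧ 0 ≤ potencia
instance (n : Int) (potencia : Int) (resultado : Int) : Decidable (Pre_construirImpares_aux n potencia resultado) := by unfold Pre_construirImpares_aux; infer_instance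
def pvWitness_construirImpares_aux : Int × Int × Int := (1352, 0, 0)
def Spec_construirImpares_aux (n : Int) (potencia : Int) (resultado : Int) (out : Int) : Prop := out = construirImpares_aux_alt n potencia resultado
instance (n : Int) (potencia : Int) (resultado : Int) (out : Int) : Decidable (Spec_construirImpares_aux n potencia resultado out) := by unfold Spec_construirImpares_aux; infer_instance

-- ===== CLAIM (what is proved, stated in full; the proofs are below) =====
def Claim_equal_construirImpares_aux : Prop := ∀ (n : Int) (potencia : Int) (resultado : Int), Dom_construirImpares_aux n potencia resultado → Pre_construirImpares_aux n potencia resultado → Spec_construirImpares_aux n potencia resultado (construirImpares_aux n potencia resultado)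

-- ===== LEMMAS AND PROOFS =====

-- positional value of a list of digits starting at power p
def pvSumPow (l : List Int) (p : Int) : Int :=
  match l with
  | [] => 0
  | d :: t => d * 10 ^ p.toNat + pvSumPow t (p + 1)

theorem pvFoldl_enumerate (l : List Int) (p s acc : Int) :
    (PySem.List.enumerate l s).foldl (fun acc q => acc + q.2 * 10 ^ (p + q.1).toNat) acc
      = acc + pvSumPow l (p + s) := by
  induction l generalizing s acc with
  | nil => simp [PySem.List.enumerate_nil, pvSumPow]
  | cons a t ih =>
      rw [PySem.List.enumerate_cons]
      simp only [List.foldl_cons, ih, pvSumPow]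
      ring_nf

theorem pvAlt_eq (n p r : Int) :
    construirImpares_aux_alt n p r
      = r + pvSumPow ((pvDigitos n).filter (fun d => PySem.Int.mod d 2 ≠ 0)) p := by
  simp only [construirImpares_aux_alt, pvFoldl_enumerate]
  simp

theorem pvA_eq (n p r : Int) (hn : 0 ≤ n) :
    construirImpares_aux n p r
      = r + pvSumPow ((pvDigitos n).filter (fun d => PySem.Int.mod d 2 ≠ 0)) p := by
  by_cases h0 : n = 0
  · subst h0
    rw [construirImpares_aux, pvDigitos]
    simp [pvSumPow]
  · have hpos : 0 < n := by omega
    have hd : 0 ≤ PySem.Int.floordiv n 10 := by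
      rw [PySem.Int.floordiv_eq_ediv_of_pos (by norm_num)]; omega
    rw [construirImpares_aux, pvDigitos]
    rw [dif_neg h0, dif_neg (show ¬ n < 0 by omega), dif_neg (show ¬ n ≤ 0 by omega)]
    simp only [List.filter_cons, decide_eq_true_eq]
    by_cases hodd : PySem.Int.mod (PySem.Int.mod n 10) 2 ≠ 0
    · rw [if_pos hodd, if_pos hodd, pvA_eq (PySem.Int.floordiv n 10) (p + 1) _ hd]
      show _ = r + (PySem.Int.mod n 10 * 10 ^ p.toNat + pvSumPow _ (p + 1))
      ring
    · rw [if_neg hodd, if_neg hodd, pvA_eq (PySem.Int.floordiv n 10) p r hd]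
termination_by n.toNat
decreasing_by all_goals exact pvDiv10_lt n (by omega)

-- ===== VERDICT (by name: the statement is the Claim_ definition above) =====
theorem construirImpares_aux_spec : Claim_equal_construirImpares_aux := by
  intro n p r _ hpre
  unfold Spec_construirImpares_aux
  rw [pvAlt_eq, pvA_eq n p r hpre.1]
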